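-- pv_equiv track=rewrite | github.com/tpnoll/SAT-Algorithms | gsat.py | prop_pure
-- ===== SOURCE A (Python) =====
-- def unit_propagation(expression, literal):
--     #Calculate the compliment of the literal
--     compliment = literal * -1
--
--     #Create a new expression we can return
--     new_expression = []
--
--     #Iterate through every clause
--     for i in range(len(expression)):
--         #Create a new clause
--         new_clause = []
--
--         #Boolean to track if a clause contains a literal
--         contains_literal = 0
--
--         #Iterate through every  literal
--         for f in range(len(expression[i])):
--             #If the literal exists in this clause
--             if(expression[i][f] == literal):
--                 #Mark the boolean to remove this clause
--                 contains_literal = 1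
--                 break
--             #Otherwise add literals that don't match the compliment
--             elif(expression[i][f] != compliment):
--                 new_clause.append(expression[i][f])
--
--         #Add the new clause to the new expression if literal was not found
--         if(contains_literal == 0):
--             new_expression.append(new_clause)
--
--     #Return the new expression
--     return new_expression
--
-- def prop_pure(expression):
--     #First do all possible unit propagation
--     do_unit_prop = 1
--     while(do_unit_prop):
--         do_unit_prop = 0
--         #As long as there is still a unit clause, unit propagation must continue
--         for i in range(len(expression)):
--             if(len(expression[i]) == 1):
--                 #This expression contains a single literal
--                 do_unit_prop = 1
--                 expression = unit_propagation(expression, expression[i][0])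
--                 break
--
--     #Next eliminate all pure literals
--     do_pure_lit = 1
--     while(do_pure_lit):
--         #Make a list of every literal in the expression
--         all_literals = []
--         for i in range(len(expression)):
--             for f in range(len(expression[i])):
--                 if(expression[i][f] not in all_literals):
--                     all_literals.append(expression[i][f])
--
--         #Then make a list that only contains the pure literals
--         pure_literals = []
--         for i in range(len(all_literals)):
--             if((all_literals[i] * -1) not in all_literals):
--                 pure_literals.append(all_literals[i])
--
--         #If pure_literals is empty we can leave the loop
--         if(len(pure_literals) == 0):
--             do_pure_lit = 0
--
--         #Go through and remove all clauses that contain a pure literal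
--         new_expression = []
--         for i in range(len(expression)):
--             found_pure_literal = 0
--             for f in range(len(pure_literals)):
--                 if(pure_literals[f] in expression[i]):
--                     found_pure_literal = 1
--                     break
--             if(found_pure_literal == 0):
--                 new_expression.append(expression[i])
--         expression = new_expression
--
--     return expression, all_literals
-- ===== SOURCE B (Python) =====
-- def prop_pure(expression):
--     # Phase 1: unit propagation, fused. One traversal per propagated literal:
--     # while building the propagated expression we already record the first unit
--     # clause it contains, so no separate scan-for-a-unit pass is needed.
--     unit = next((c[0] for c in expression if len(c) == 1), None)
--     while unit is not None:
--         new_expression = []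
--         next_unit = None
--         for clause in expression:
--             if unit in clause:
--                 continue
--             new_clause = [x for x in clause if x != -unit]
--             if next_unit is None and len(new_clause) == 1:
--                 next_unit = new_clause[0]
--             new_expression.append(new_clause)
--         expression = new_expression
--         unit = next_unit
--
--     # Phase 2: pure-literal elimination ONE literal at a time (finer-grained
--     # fixpoint; clause removal is monotone, so the fixpoint is the same as
--     # removing the whole pure set per round).
--     while True:
--         pure = next((x for c in expression for x in c
--                      if all(-x not in d for d in expression)), None)
--         if pure is None:
--             break
--         expression = [c for c in expression if pure not in c]
--
--     # all_literals: first-occurrence order over the final expression, once.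
--     all_literals = []
--     for clause in expression:
--         for x in clause:
--             if x not in all_literals:
--                 all_literals.append(x)
--     return expression, all_literals
-- ===== Notes on version B (the rewrite author's own statement) =====
-- stated objective: alternative
-- what changed: Phase 1 fuses each propagation with the search for the next unit clause (one traversal per propagated literal instead of a full propagate pass followed by a rescan-from-the-top pass), and phase 2 eliminates one pure literal at a time instead of removing a whole pure set per round (same fixpoint because clause removal preserves purity, proved as a confluence lemma), with all_literals computed once from the final expression instead of being rebuilt every round.
import Mathlib
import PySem

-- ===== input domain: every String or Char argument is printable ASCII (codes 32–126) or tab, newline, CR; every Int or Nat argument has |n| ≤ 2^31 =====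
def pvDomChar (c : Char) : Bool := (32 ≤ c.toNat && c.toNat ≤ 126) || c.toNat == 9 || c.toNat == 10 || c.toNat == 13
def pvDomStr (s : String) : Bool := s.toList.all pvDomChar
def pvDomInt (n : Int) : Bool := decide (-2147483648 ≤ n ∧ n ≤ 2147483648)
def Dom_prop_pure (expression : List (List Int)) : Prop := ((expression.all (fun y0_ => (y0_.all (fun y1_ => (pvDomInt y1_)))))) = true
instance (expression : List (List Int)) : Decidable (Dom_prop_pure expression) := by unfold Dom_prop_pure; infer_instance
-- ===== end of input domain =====

-- B keeps A's observable propagation order but restructures both phases: phase 1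
-- fuses the propagation pass with the search for the next unit clause (one
-- traversal per propagated literal instead of propagate-then-rescan), and phase 2
-- eliminates ONE pure literal at a time instead of a whole pure set per round
-- (same fixpoint: clause removal is monotone — proved below), with all_literals
-- computed once from the final expression.

-- ===== PORT A =====

-- inner 'for f' loop of unit_propagation (with break on finding the literal)
def pvScanClause (literal compliment : Int) : List Int → Int × List Int
  | [] => (0, [])
  | x :: xs =>
    if x == literal then (1, [])
    else if x != compliment then
      let r := pvScanClause literal compliment xs
      (r.1, x :: r.2)
    else pvScanClause literal compliment xs

def unit_propagation (expression : List (List Int)) (literal : Int) : List (List Int) :=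
  let compliment := literal * -1
  expression.foldl (fun acc c =>
    let s := pvScanClause literal compliment c
    if s.1 == 0 then acc ++ [s.2] else acc) []

-- the 'for i' scan-with-break of phase 1: first unit clause's literal
def pvFindUnitA : List (List Int) → Option Int
  | [] => none
  | c :: rest => if c.length == 1 then some (c.headD 0) else pvFindUnitA rest

-- (termination helpers for the loops; cited in decreasing_by)
theorem pvScanClause_fst (l comp : Int) (c : List Int) :
    (pvScanClause l comp c).1 = if c.contains l then 1 else 0 := by
  induction c with
  | nil => simp [pvScanClause]
  | cons x xs ih =>
    by_cases hx : x = l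
    · simp [pvScanClause, hx]
    · have hlx : l ≠ x := fun h => hx h.symm
      by_cases hc : x = comp
      · have hcl : comp ≠ l := hc ▸ hx
        have hlc : l ≠ comp := fun h => hcl h.symm
        simp [pvScanClause, hc, ih, hcl, hlc, bne]
      · simp [pvScanClause, hx, hc, ih, hlx, bne]

theorem pvScanClause_snd (l comp : Int) (c : List Int) (h : c.contains l = false) :
    (pvScanClause l comp c).2 = c.filter (fun x => x != comp) := by
  induction c with
  | nil => simp [pvScanClause]
  | cons x xs ih =>
    simp only [List.contains_cons, Bool.or_eq_false_iff, beq_eq_false_iff_ne] at h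
    have hxl : x ≠ l := fun hx => h.1 hx.symm
    by_cases hc : x = comp
    · have hcl : comp ≠ l := hc ▸ hxl
      simp [pvScanClause, hc, ih h.2, hcl, bne]
    · simp [pvScanClause, hxl, hc, ih h.2, bne]

theorem pvUnitProp_eq (E : List (List Int)) (l : Int) :
    unit_propagation E l =
      (E.filter (fun c => !(c.contains l))).map (fun c => c.filter (fun x => x != -l)) := by
  unfold unit_propagation
  suffices h : ∀ acc : List (List Int),
      E.foldl (fun acc c =>
        let s := pvScanClause l (l * -1) c
        if s.1 == 0 then acc ++ [s.2] else acc) acc =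
      acc ++ (E.filter (fun c => !(c.contains l))).map (fun c => c.filter (fun x => x != -l)) by
    simpa using h []
  induction E with
  | nil => intro acc; simp
  | cons c E ih =>
    intro acc
    rw [List.foldl_cons]
    cases hc : c.contains l
    · have hni : l ∉ c := by simpa [List.contains_iff_mem] using hc
      have h1 : (((pvScanClause l (l * -1) c).1 == 0) = true) := by
        rw [pvScanClause_fst]; simp [hni]
      simp only [h1, if_true]
      rw [ih, pvScanClause_snd l (l * -1) c hc]
      simp [hni, List.append_assoc]
    · have hmem : l ∈ c := by simpa [List.contains_iff_mem] using hc
      have h1 : (((pvScanClause l (l * -1) c).1 == 0) = false) := by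
        rw [pvScanClause_fst]; simp [hmem]
      simp only [h1, Bool.false_eq_true, if_false]
      rw [ih]
      simp [hmem]

theorem pvFindUnitA_mem (E : List (List Int)) (l : Int) (h : pvFindUnitA E = some l) :
    [l] ∈ E := by
  induction E with
  | nil => simp [pvFindUnitA] at h
  | cons c E ih =>
    by_cases h1 : c.length = 1
    · match c, h1 with
      | [a], _ =>
        simp [pvFindUnitA] at h
        simp [h]
    · simp [pvFindUnitA, h1] at h
      exact List.mem_cons_of_mem _ (ih h)

theorem pvLenUnitProp (E : List (List Int)) (l : Int) (h : pvFindUnitA E = some l) :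
    (unit_propagation E l).length < E.length := by
  rw [pvUnitProp_eq, List.length_map]
  rw [List.length_filter_lt_length_iff_exists]
  exact ⟨[l], pvFindUnitA_mem E l h, by simp⟩

-- phase-1 'while(do_unit_prop)' loop
def pvUnitLoopA (E : List (List Int)) : List (List Int) :=
  match h : pvFindUnitA E with
  | none => E
  | some l => pvUnitLoopA (unit_propagation E l)
termination_by E.length
decreasing_by exact pvLenUnitProp E l h

-- the nested 'all_literals' accumulation loops
def pvAllLits (E : List (List Int)) : List Int :=
  E.foldl (fun acc c =>
    c.foldl (fun a x => if !(a.contains x) then a ++ [x] else a) acc) []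

-- the 'pure_literals' loop
def pvPureLits (all : List Int) : List Int :=
  all.foldl (fun acc x => if !(all.contains (x * -1)) then acc ++ [x] else acc) []

-- inner 'for f' over pure_literals with break
def pvHasPure (pure : List Int) (c : List Int) : Int :=
  match pure with
  | [] => 0
  | p :: ps => if c.contains p then 1 else pvHasPure ps c

-- the clause-removal loop of phase 2
def pvFilterPure (pure : List Int) (E : List (List Int)) : List (List Int) :=
  E.foldl (fun acc c => if pvHasPure pure c == 0 then acc ++ [c] else acc) []

-- (termination helpers for the phase-2 loop)
theorem pvAllLits_eq (E : List (List Int)) :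
    pvAllLits E = PySem.Set.ofList E.flatten := by
  have hadd : (fun (a : List Int) (x : Int) =>
      if (!(a.contains x)) = true then a ++ [x] else a) = PySem.Set.add := by
    funext a x
    by_cases h : x ∈ a <;> simp [PySem.Set.add, PySem.Set.contains, h]
  unfold pvAllLits
  rw [PySem.Set.ofList_eq_foldl, List.foldl_flatten, hadd]

theorem pvPureLits_eq (all : List Int) :
    pvPureLits all = all.filter (fun x => !(all.contains (x * -1))) := by
  unfold pvPureLits
  exact (PySem.List.foldl_append_if_eq_filter (fun x => !(all.contains (x * -1))) all []).trans
    (by simp)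

theorem pvHasPure_iff (pure c : List Int) :
    pvHasPure pure c = 0 ↔ ∀ p ∈ pure, p ∉ c := by
  induction pure with
  | nil => simp [pvHasPure]
  | cons p ps ih =>
    by_cases h : p ∈ c
    · simp [pvHasPure, h]
    · simp [pvHasPure, h, ih]

theorem pvFilterPure_eq (pure : List Int) (E : List (List Int)) :
    pvFilterPure pure E = E.filter (fun c => pvHasPure pure c == 0) := by
  unfold pvFilterPure
  exact (PySem.List.foldl_append_if_eq_filter (fun c => pvHasPure pure c == 0) E []).trans
    (by simp)

theorem pvMem_pureLits (E : List (List Int)) (q : Int) :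
    q ∈ pvPureLits (pvAllLits E) ↔ q ∈ E.flatten ∧ -q ∉ E.flatten := by
  rw [pvPureLits_eq, List.mem_filter, pvAllLits_eq]
  simp [PySem.Set.mem_ofList]

theorem pvLenFilterPure (E : List (List Int))
    (h : ¬ ((pvPureLits (pvAllLits E)).length == 0) = true) :
    (pvFilterPure (pvPureLits (pvAllLits E)) E).length < E.length := by
  rw [pvFilterPure_eq, List.length_filter_lt_length_iff_exists]
  have hne : pvPureLits (pvAllLits E) ≠ [] := by
    intro hnil; rw [hnil] at h; simp at h
  obtain ⟨p, hp⟩ := List.exists_mem_of_ne_nil _ hne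
  obtain ⟨hpocc, -⟩ := (pvMem_pureLits E p).mp hp
  obtain ⟨c, hcE, hpc⟩ := List.mem_flatten.mp hpocc
  refine ⟨c, hcE, ?_⟩
  simp only [beq_iff_eq, pvHasPure_iff, not_forall]
  exact ⟨p, hp, by simp [hpc]⟩

-- phase-2 'while(do_pure_lit)' loop
def pvPureLoopA (E : List (List Int)) : List (List Int) × List Int :=
  let all := pvAllLits E
  let pure := pvPureLits all
  let newE := pvFilterPure pure E
  if pure.length == 0 then (newE, all) else pvPureLoopA newE
termination_by E.length
decreasing_by exact pvLenFilterPure E (by assumption)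

def prop_pure (expression : List (List Int)) : List (List Int) × List Int :=
  pvPureLoopA (pvUnitLoopA expression)

-- ===== PORT B =====

-- next((c[0] for c in expression if len(c) == 1), None)
def pvFirstUnitB (E : List (List Int)) : Option Int :=
  (E.find? (fun c => c.length == 1)).map (fun c => c.headD 0)

-- one fused traversal: build the propagated expression AND record the first
-- unit clause it contains (Python's inner 'for clause in expression' loop)
def pvStepB (u : Int) : List (List Int) → List (List Int) × Option Int
  | [] => ([], none)
  | c :: rest =>
    if c.contains u then pvStepB u rest
    else
      let c2 := c.filter (fun x => x != -u)
      let r := pvStepB u rest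
      (c2 :: r.1, if c2.length == 1 then some (c2.headD 0) else r.2)

-- (termination helper, cited in decreasing_by)
theorem pvStepB_eq (u : Int) (E : List (List Int)) :
    pvStepB u E =
      ((E.filter (fun c => !(c.contains u))).map (fun c => c.filter (fun x => x != -u)),
        pvFindUnitA ((E.filter (fun c => !(c.contains u))).map (fun c => c.filter (fun x => x != -u)))) := by
  induction E with
  | nil => rfl
  | cons c rest ih =>
    simp only [pvStepB]
    by_cases h : c.contains u
    · rw [if_pos h, ih, List.filter_cons_of_neg (by simpa using h)]
    · rw [if_neg h, List.filter_cons_of_pos (by simpa using h), List.map_cons, ih]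
      simp only [pvFindUnitA]

theorem pvLenStepB (u : Int) (E : List (List Int)) (h : [u] ∈ E) :
    (pvStepB u E).1.length < E.length := by
  rw [pvStepB_eq]
  simp only [List.length_map]
  rw [List.length_filter_lt_length_iff_exists]
  exact ⟨[u], h, by simp⟩

-- phase-1 'while unit is not None' loop (the membership guard only establishes
-- termination; it holds on every reachable call, since a 'some u' always comes
-- with the unit clause [u] present)
def pvUnitLoopB (u : Option Int) (E : List (List Int)) : List (List Int) :=
  match u with
  | none => E
  | some u =>
    if h : [u] ∈ E then pvUnitLoopB (pvStepB u E).2 (pvStepB u E).1 else E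
termination_by E.length
decreasing_by exact pvLenStepB u E h

-- next((x for c in expression for x in c if all(-x not in d for d in expression)), None)
def pvFindPureB (E : List (List Int)) : Option Int :=
  (E.flatMap id).find? (fun x => E.all (fun d => !(d.contains (-x))))

-- [c for c in expression if pure not in c]
def pvRemovePureB (p : Int) (E : List (List Int)) : List (List Int) :=
  E.filter (fun c => !(c.contains p))

-- (termination helper, cited in decreasing_by)
theorem pvLenRemovePure (E : List (List Int)) (p : Int) (h : pvFindPureB E = some p) :
    (pvRemovePureB p E).length < E.length := by
  rw [pvRemovePureB, List.length_filter_lt_length_iff_exists]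
  have hmem : p ∈ E.flatMap id := List.mem_of_find?_eq_some h
  obtain ⟨c, hcE, hpc⟩ := List.mem_flatten.mp (by simpa [List.flatMap_id] using hmem)
  exact ⟨c, hcE, by simp [hpc]⟩

-- phase-2 loop: remove the clauses of one pure literal at a time
def pvPureLoopB (E : List (List Int)) : List (List Int) :=
  match h : pvFindPureB E with
  | none => E
  | some p => pvPureLoopB (pvRemovePureB p E)
termination_by E.length
decreasing_by exact pvLenRemovePure E p h

-- the final 'all_literals' accumulation loops of Source B
def pvAllLitsB (E : List (List Int)) : List Int :=
  E.foldl (fun acc c =>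
    c.foldl (fun a x => if !(a.contains x) then a ++ [x] else a) acc) []

def prop_pure_alt (expression : List (List Int)) : List (List Int) × List Int :=
  let e1 := pvUnitLoopB (pvFirstUnitB expression) expression
  let final := pvPureLoopB e1
  (final, pvAllLitsB final)

-- ===== PRECONDITION & SPEC =====
def Spec_prop_pure (expression : List (List Int)) (out : List (List Int) × List Int) : Prop := out = prop_pure_alt expression
instance (expression : List (List Int)) (out : List (List Int) × List Int) : Decidable (Spec_prop_pure expression out) := by unfold Spec_prop_pure; infer_instance

-- ===== CLAIM (what is proved, stated in full; the proofs are below) =====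
def Claim_equal_prop_pure : Prop := ∀ (expression : List (List Int)), Dom_prop_pure expression → Spec_prop_pure expression (prop_pure expression)

-- ===== LEMMAS AND PROOFS =====

theorem pvFindUnit_eq (E : List (List Int)) : pvFindUnitA E = pvFirstUnitB E := by
  induction E with
  | nil => simp [pvFindUnitA, pvFirstUnitB]
  | cons c E ih =>
    unfold pvFirstUnitB
    rw [List.find?_cons]
    by_cases h : c.length = 1
    · simp [pvFindUnitA, h]
    · have hb : (c.length == 1) = false := by simp [h]
      simp only [pvFindUnitA, hb]
      exact ih

theorem pvUnitLoop_eq (E : List (List Int)) : pvUnitLoopA E = pvUnitLoopB (pvFindUnitA E) E := by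
  induction hn : E.length using Nat.strong_induction_on generalizing E with
  | _ n ih =>
  unfold pvUnitLoopA pvUnitLoopB
  cases h : pvFindUnitA E with
  | none => rfl
  | some l =>
    have hmem : [l] ∈ E := pvFindUnitA_mem E l h
    simp only [hmem, dif_pos]
    rw [pvStepB_eq]
    simp only []
    rw [← pvUnitProp_eq]
    exact ih (unit_propagation E l).length (hn ▸ pvLenUnitProp E l h) _ rfl

-- removal of every clause meeting a literal of S (the shape of both phase-2 filters)
def pvRmAll (S : List Int) (E : List (List Int)) : List (List Int) :=
  E.filter (fun c => S.all (fun p => !(c.contains p)))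

theorem pvFilterPure_rmAll (pure : List Int) (E : List (List Int)) :
    pvFilterPure pure E = pvRmAll pure E := by
  rw [pvFilterPure_eq, pvRmAll]
  refine List.filter_congr (fun c _ => ?_)
  rw [Bool.eq_iff_iff]
  simp [pvHasPure_iff]

theorem pvRmAll_comm (S P : List Int) (E : List (List Int)) :
    pvRmAll S (pvRmAll P E) = pvRmAll P (pvRmAll S E) := by
  simp only [pvRmAll, List.filter_filter]
  exact List.filter_congr (fun c _ => Bool.and_comm _ _)

theorem pvRmAll_flatten_sub (S : List Int) (E : List (List Int)) (x : Int)
    (h : x ∈ (pvRmAll S E).flatten) : x ∈ E.flatten := by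
  obtain ⟨c, hc, hxc⟩ := List.mem_flatten.mp h
  exact List.mem_flatten.mpr ⟨c, List.mem_of_mem_filter hc, hxc⟩

-- confluence of pure-literal elimination: removing the clauses of any literals
-- whose complements are absent does not change the fixpoint A computes
theorem pvRmAll_preserve (n : Nat) (E : List (List Int)) (hn : E.length ≤ n)
    (S : List Int) (hS : ∀ s ∈ S, -s ∉ E.flatten) :
    pvPureLoopA (pvRmAll S E) = pvPureLoopA E := by
  induction n generalizing E S with
  | zero =>
    have : E = [] := List.eq_nil_of_length_eq_zero (Nat.le_zero.mp hn)
    subst this; rfl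
  | succ n ih =>
    by_cases heq : pvRmAll S E = E
    · rw [heq]
    · -- some clause was removed, so some s ∈ S occurs in E and is pure in E
      have hex : ∃ c ∈ E, ¬ (S.all (fun p => !(c.contains p)) = true) := by
        by_contra hall
        exact heq (List.filter_eq_self.mpr (by simpa using hall))
      obtain ⟨c, hcE, hc⟩ := hex
      simp only [List.all_eq_true, Bool.not_eq_true', Bool.not_eq_false,
        List.contains_iff_mem, not_forall] at hc
      obtain ⟨s, hsS, hsc⟩ := hc
      have hsocc : s ∈ E.flatten := List.mem_flatten.mpr ⟨c, hcE, hsc⟩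
      have hsP : s ∈ pvPureLits (pvAllLits E) :=
        (pvMem_pureLits E s).mpr ⟨hsocc, hS s hsS⟩
      set P := pvPureLits (pvAllLits E) with hPdef
      have hPne : ¬ ((P.length == 0) = true) := by
        intro h0
        simp only [beq_iff_eq, List.length_eq_zero_iff] at h0
        rw [h0] at hsP; exact (List.not_mem_nil) hsP
      -- lengths
      have hlenS : (pvRmAll S E).length < E.length := by
        have hsub : (pvRmAll S E).length ≤ E.length := List.length_filter_le _ _
        rcases Nat.lt_or_ge (pvRmAll S E).length E.length with h | h
        · exact h
        · exact absurd (List.Sublist.eq_of_length (List.filter_sublist)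
            (Nat.le_antisymm hsub h)) heq
      have hlenP : (pvRmAll P E).length < E.length := by
        rw [← pvFilterPure_rmAll]; exact pvLenFilterPure E hPne
      -- side conditions
      have hP_pure : ∀ q ∈ P, -q ∉ E.flatten := fun q hq => ((pvMem_pureLits E q).mp hq).2
      have hP_on_S : ∀ q ∈ P, -q ∉ (pvRmAll S E).flatten := fun q hq hmem =>
        hP_pure q hq (pvRmAll_flatten_sub S E _ hmem)
      have hS_on_P : ∀ s' ∈ S, -s' ∉ (pvRmAll P E).flatten := fun s' hs hmem =>
        hS s' hs (pvRmAll_flatten_sub P E _ hmem)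
      -- one A-round on E
      have hstep : pvPureLoopA E = pvPureLoopA (pvRmAll P E) := by
        rw [pvPureLoopA]
        simp only [← hPdef, hPne, pvFilterPure_rmAll]
        simp
      calc pvPureLoopA (pvRmAll S E)
          = pvPureLoopA (pvRmAll P (pvRmAll S E)) :=
            (ih (pvRmAll S E) (by omega) P hP_on_S).symm
        _ = pvPureLoopA (pvRmAll S (pvRmAll P E)) := by rw [pvRmAll_comm]
        _ = pvPureLoopA (pvRmAll P E) :=
            ih (pvRmAll P E) (by omega) S hS_on_P
        _ = pvPureLoopA E := hstep.symm

theorem pvPureLoop_eq (E : List (List Int)) :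
    pvPureLoopA E = (pvPureLoopB E, pvAllLits (pvPureLoopB E)) := by
  induction hn : E.length using Nat.strong_induction_on generalizing E with
  | _ n ih =>
  rw [pvPureLoopB]
  cases h : pvFindPureB E with
  | none =>
    -- no pure literal occurs: A's pure set is empty and its final round is a no-op
    have hnone : ∀ x ∈ E.flatten, -x ∈ E.flatten := by
      intro x hx
      have := List.find?_eq_none.mp h x (by simpa [List.flatMap_id] using hx)
      simp only [List.all_eq_true, Bool.not_eq_true', List.contains_iff_mem, not_forall,
        Bool.not_eq_false] at this
      obtain ⟨d, hdE, hd⟩ := this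
      exact List.mem_flatten.mpr ⟨d, hdE, hd⟩
    have hP : pvPureLits (pvAllLits E) = [] := by
      rw [List.eq_nil_iff_forall_not_mem]
      intro q hq
      obtain ⟨hq1, hq2⟩ := (pvMem_pureLits E q).mp hq
      exact hq2 (hnone q hq1)
    rw [pvPureLoopA]
    simp only [hP, List.length_nil, beq_self_eq_true, if_true]
    have hfull : pvFilterPure ([] : List Int) E = E := by
      rw [pvFilterPure_eq]; simp [pvHasPure]
    rw [hfull]
  | some p =>
    -- p is pure in E: removing its clauses keeps A's fixpoint (confluence)
    have hpure : -p ∉ E.flatten := by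
      have := List.find?_some h
      simp only [List.all_eq_true, Bool.not_eq_true'] at this
      intro hmem
      obtain ⟨d, hdE, hd⟩ := List.mem_flatten.mp hmem
      have := this d hdE
      simp [hd] at this
    have hrm : pvRmAll [p] E = pvRemovePureB p E := by
      unfold pvRmAll pvRemovePureB
      exact List.filter_congr (fun c _ => by simp)
    have hlen : (pvRemovePureB p E).length < E.length := pvLenRemovePure E p h
    calc pvPureLoopA E
        = pvPureLoopA (pvRmAll [p] E) :=
          (pvRmAll_preserve E.length E le_rfl [p] (by simpa using hpure)).symm
      _ = pvPureLoopA (pvRemovePureB p E) := by rw [hrm]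
      _ = _ := ih _ (hn ▸ hlen) _ rfl

theorem pvAllLitsB_eq : pvAllLitsB = pvAllLits := rfl

-- ===== VERDICT (by name: the statement is the Claim_ definition above) =====
theorem prop_pure_spec : Claim_equal_prop_pure := by
  intro E _
  unfold Spec_prop_pure prop_pure prop_pure_alt
  rw [← pvFindUnit_eq, ← pvUnitLoop_eq, pvPureLoop_eq, pvAllLitsB_eq]
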